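-- pv_equiv track=rewrite | github.com/TerrayTM/pytimize | optimizathon/programs/_linear_program.py | __convert_indices
-- ===== SOURCE A (Python) =====
-- def __convert_indices(indices, min_value=None, max_value=None):
--     """
--     Converts from math indexing to array indexing.
--
--     min_value is the closed lower bound allowed for minimum index value.
--     max_value is the open upper bound allowed for minimum index value.
--
--     """
--     indices = list(map(lambda i: i - 1, indices))
--
--     if len(indices) > 0:
--         conditions = [
--             not min_value == None and min(indices) < min_value,
--             max_value and max(indices) >= max_value,
--             any(not type(i) == int for i in indices)
--         ]
--
--         if any(conditions):
--             raise IndexError()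
--
--     return indices
-- ===== SOURCE B (Python) =====
-- def __convert_indices(indices, min_value=None, max_value=None):
--     shifted = [i - 1 for i in indices]
--     if shifted:
--         if not min_value == None or max_value:
--             s = sorted(shifted)
--             if not min_value == None and s[0] < min_value:
--                 raise IndexError()
--             if max_value and s[-1] >= max_value:
--                 raise IndexError()
--         if any(not type(v) == int for v in shifted):
--             raise IndexError()
--     return shifted
-- ===== Notes on version B (the rewrite author's own statement) =====
-- stated objective: alternative
-- what changed: Replaces A's min()/max() scans by sorting a copy of the shifted list once (only when a bound is active) and checking its two endpoints s[0]/s[-1] against the bounds, with a list comprehension for the shift.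
import Mathlib
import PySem

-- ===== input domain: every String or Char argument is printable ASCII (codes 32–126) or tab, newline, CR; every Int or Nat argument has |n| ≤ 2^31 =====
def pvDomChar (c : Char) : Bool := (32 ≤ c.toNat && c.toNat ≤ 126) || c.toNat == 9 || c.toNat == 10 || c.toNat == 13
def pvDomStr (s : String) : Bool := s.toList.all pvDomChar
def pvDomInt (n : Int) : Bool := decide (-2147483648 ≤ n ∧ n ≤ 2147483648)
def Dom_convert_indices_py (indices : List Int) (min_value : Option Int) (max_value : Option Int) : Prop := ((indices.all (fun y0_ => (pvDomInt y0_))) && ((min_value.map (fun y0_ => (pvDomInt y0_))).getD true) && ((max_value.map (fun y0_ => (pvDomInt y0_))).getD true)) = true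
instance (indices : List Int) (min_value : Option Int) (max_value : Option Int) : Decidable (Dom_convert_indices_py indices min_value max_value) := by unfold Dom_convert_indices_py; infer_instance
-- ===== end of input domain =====

-- B validates the bounds on a sorted copy's endpoints instead of A's min()/max() scans;
-- return-value equivalence is proved on Pre_ (the inputs where A does not raise).

-- Python truthiness of an optional int (None and 0 are falsy)
def pyTruthyInt : Option Int → Bool
  | some m => m != 0
  | none => false

-- ===== PORT A =====
-- condition 'not min_value == None and min(indices) < min_value'
def pvCondMin (min_value : Option Int) (idx : List Int) : Bool :=
  match min_value with
  | none => false
  | some mv => decide ((PySem.List.min? idx (fun x => x)).getD 0 < mv)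

-- condition 'max_value and max(indices) >= max_value'  (truthy: None and 0 are falsy)
def pvCondMax (max_value : Option Int) (idx : List Int) : Bool :=
  pyTruthyInt max_value && decide ((PySem.List.max? idx (fun x => x)).getD 0 ≥ max_value.getD 0)

def convert_indices_py (indices : List Int) (min_value : Option Int) (max_value : Option Int) : List Int :=
  -- indices = list(map(lambda i: i - 1, indices))
  let idx := indices.map (fun i => i - 1)
  if idx.length > 0 then
    let c1 := pvCondMin min_value idx
    let c2 := pvCondMax max_value idx
    -- any(not type(i) == int for i in indices): elements are int, always False
    let c3 := idx.any (fun _ => false)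
    -- if any(conditions): raise IndexError()  (raising inputs are excluded by Pre_)
    if c1 || c2 || c3 then [] else idx
  else idx

-- ===== PORT B =====
def convert_indices_py_alt (indices : List Int) (min_value : Option Int) (max_value : Option Int) : List Int :=
  -- shifted = [i - 1 for i in indices]
  let shifted := indices.map (fun i => i - 1)
  if shifted ≠ [] then
    -- if not min_value == None or max_value: sort once, check the endpoints
    if min_value.isSome || pyTruthyInt max_value then
      let s := PySem.List.sorted shifted (fun x => x) false
      -- if not min_value == None and s[0] < min_value: raise IndexError()
      if min_value.isSome && decide ((PySem.List.pyGet? s 0).getD 0 < min_value.getD 0) then []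
      -- if max_value and s[-1] >= max_value: raise IndexError()
      else if pyTruthyInt max_value && decide ((PySem.List.pyGet? s (-1)).getD 0 ≥ max_value.getD 0) then []
      -- any(not type(v) == int for v in shifted): elements are int, never fires
      else if shifted.any (fun _ => false) then []
      else shifted
    else if shifted.any (fun _ => false) then []
    else shifted
  else shifted

-- ===== PRECONDITION & SPEC =====
-- Pre_ excludes exactly the inputs on which A raises IndexError: a non-empty list whose
-- shifted values go below an active min bound or reach a truthy (non-zero) max bound.
def Pre_convert_indices_py (indices : List Int) (min_value : Option Int) (max_value : Option Int) : Prop :=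
  indices = [] ∨
    ((∀ m ∈ min_value.toList, ∀ i ∈ indices, m ≤ i - 1) ∧
     (∀ M ∈ max_value.toList, M = 0 ∨ ∀ i ∈ indices, i - 1 < M))

instance (indices : List Int) (min_value : Option Int) (max_value : Option Int) : Decidable (Pre_convert_indices_py indices min_value max_value) := by
  unfold Pre_convert_indices_py; infer_instance

def pvWitness_convert_indices_py : List Int × Option Int × Option Int := ([1, 3, 2], some 0, some 5)

def Spec_convert_indices_py (indices : List Int) (min_value : Option Int) (max_value : Option Int) (out : List Int) : Prop := out = convert_indices_py_alt indices min_value max_value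
instance (indices : List Int) (min_value : Option Int) (max_value : Option Int) (out : List Int) : Decidable (Spec_convert_indices_py indices min_value max_value out) := by unfold Spec_convert_indices_py; infer_instance

-- ===== CLAIM (what is proved, stated in full; the proofs are below) =====
def Claim_equal_convert_indices_py : Prop := ∀ (indices : List Int) (min_value : Option Int) (max_value : Option Int), Dom_convert_indices_py indices min_value max_value → Pre_convert_indices_py indices min_value max_value → Spec_convert_indices_py indices min_value max_value (convert_indices_py indices min_value max_value)

-- ===== LEMMAS AND PROOFS =====

-- under Pre_, both A's min/max-scan checks and B's sorted-endpoint checks are vacuous,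
-- so both ports return the shifted list; we show each check false and conclude.
theorem pv_core (indices : List Int) (mn mx : Option Int)
    (hne : indices ≠ [])
    (hminP : ∀ m, mn = some m → ∀ i ∈ indices, m ≤ i - 1)
    (hmaxP : ∀ M, mx = some M → M = 0 ∨ ∀ i ∈ indices, i - 1 < M) :
    convert_indices_py indices mn mx = convert_indices_py_alt indices mn mx := by
  set idx := indices.map (fun i => i - 1) with hidx
  have hidxne : idx ≠ [] := by
    intro h; exact hne (List.map_eq_nil_iff.mp h)
  have hmem : ∀ v ∈ idx, (∀ m, mn = some m → m ≤ v) ∧ (∀ M, mx = some M → M ≠ 0 → v < M) := by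
    intro v hv
    obtain ⟨i, hi, rfl⟩ := List.mem_map.mp hv
    refine ⟨fun m hm => hminP m hm i hi, fun M hM h0 => ?_⟩
    rcases hmaxP M hM with h | h
    · exact absurd h h0
    · exact h i hi
  set s := PySem.List.sorted idx (fun x : Int => x) false with hs
  have hsne : s ≠ [] := by
    intro h
    have := PySem.List.length_sorted (xs := idx) (key := fun x : Int => x) (rev := false)
    rw [hs] at h; rw [h] at this; simp at this
    exact hidxne (List.eq_nil_of_length_eq_zero this.symm)
  have hsmem : ∀ v ∈ s, v ∈ idx := fun v hv => (PySem.List.sorted_perm (xs := idx) (key := fun x : Int => x) (rev := false)).mem_iff.mp hv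
  -- A's conditions are false
  have hc1 : pvCondMin mn idx = false := by
    rcases mn with _ | m
    · rfl
    · rcases hmn : PySem.List.min? idx (fun x : Int => x) with _ | m0
      · exact absurd ((PySem.List.min?_eq_none_iff _ _).mp hmn) hidxne
      · have := (hmem m0 (PySem.List.min?_mem hmn)).1 m rfl
        simp [pvCondMin, hmn]; omega
  have hc2 : pvCondMax mx idx = false := by
    rcases mx with _ | M
    · rfl
    · by_cases hM : M = 0
      · simp [pvCondMax, pyTruthyInt, hM]
      · rcases hmx : PySem.List.max? idx (fun x : Int => x) with _ | m1
        · exact absurd ((PySem.List.max?_eq_none_iff _ _).mp hmx) hidxne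
        · have := (hmem m1 (PySem.List.max?_mem hmx)).2 M rfl hM
          simp [pvCondMax, pyTruthyInt, hmx]
          intro _; omega
  -- B's endpoint checks are false
  have hb1 : (mn.isSome && decide ((PySem.List.pyGet? s 0).getD 0 < mn.getD 0)) = false := by
    rcases mn with _ | m
    · rfl
    · rcases h0 : PySem.List.pyGet? s 0 with _ | v
      · rw [PySem.List.pyGet?_zero] at h0
        rcases s with _ | ⟨a, t⟩
        · exact absurd rfl hsne
        · simp at h0
      · have hv := hsmem v (PySem.List.mem_of_pyGet?_eq_some _ h0)
        have := (hmem v hv).1 m rfl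
        simp; omega
  have hb2 : (pyTruthyInt mx && decide ((PySem.List.pyGet? s (-1)).getD 0 ≥ mx.getD 0)) = false := by
    rcases mx with _ | M
    · rfl
    · by_cases hM : M = 0
      · simp [pyTruthyInt, hM]
      · rcases h0 : PySem.List.pyGet? s (-1) with _ | v
        · rw [PySem.List.pyGet?_neg_one] at h0
          exact absurd (List.getLast?_eq_none_iff.mp h0) hsne
        · have hv := hsmem v (PySem.List.mem_of_pyGet?_eq_some _ h0)
          have := (hmem v hv).2 M rfl hM
          simp [pyTruthyInt]
          intro _; omega
  unfold convert_indices_py convert_indices_py_alt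
  simp only [← hidx, ← hs]
  simp [hc1, hc2, hb1, hb2, hidxne, List.length_pos_iff]

-- ===== VERDICT (by name: the statement is the Claim_ definition above) =====
theorem convert_indices_py_spec : Claim_equal_convert_indices_py := by
  intro indices mn mx _hdom hpre
  unfold Spec_convert_indices_py
  rcases hpre with h | ⟨hmin, hmax⟩
  · subst h; simp [convert_indices_py, convert_indices_py_alt]
  by_cases hne : indices = []
  · subst hne; simp [convert_indices_py, convert_indices_py_alt]
  exact pv_core indices mn mx hne
    (fun m hm => hmin m (by simp [hm]))
    (fun M hM => hmax M (by simp [hM]))
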